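-- pv_equiv track=rewrite | github.com/hanaunicorn/Calculators | Practice-NumberComparison.py | get_number_sequences
-- ===== SOURCE A (Python) =====
-- def get_number_sequences(number_sequence):
--     first_sequence = ""
--     second_sequence = ""
--     is_first_sequence = True
-- # "char.isdigit" is to determine if a character, in this case, the number that will repeat front and back is a number digit.
-- # Once it finishes the list of digits, it goes past all letters, that are tested, and continues on the second string of numbers
--     for char in number_sequence:
--         # Accumulate digits as part of the number sequences
--         if char.isdigit():
--             if is_first_sequence:
--                 first_sequence += char
--             else:
--                 second_sequence += char
--         else:
--             # Once non-digit characters are encountered, switch to the second number sequence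
--             is_first_sequence = False
--
--     return first_sequence, second_sequence
-- ===== SOURCE B (Python) =====
-- def get_number_sequences(number_sequence):
--     n = len(number_sequence)
--     i = 0
--     while i < n and number_sequence[i].isdigit():
--         i += 1
--     first_sequence = number_sequence[:i]
--     second_sequence = "".join(filter(str.isdigit, number_sequence[i:]))
--     return first_sequence, second_sequence
-- ===== Notes on version B (the rewrite author's own statement) =====
-- stated objective: simpler
-- what changed: Replaces A's stateful single loop with a flag by a two-phase decomposition: the leading digit run is taken as a prefix scan, and the second sequence is a filter of the remaining suffix.
import Mathlib
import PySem

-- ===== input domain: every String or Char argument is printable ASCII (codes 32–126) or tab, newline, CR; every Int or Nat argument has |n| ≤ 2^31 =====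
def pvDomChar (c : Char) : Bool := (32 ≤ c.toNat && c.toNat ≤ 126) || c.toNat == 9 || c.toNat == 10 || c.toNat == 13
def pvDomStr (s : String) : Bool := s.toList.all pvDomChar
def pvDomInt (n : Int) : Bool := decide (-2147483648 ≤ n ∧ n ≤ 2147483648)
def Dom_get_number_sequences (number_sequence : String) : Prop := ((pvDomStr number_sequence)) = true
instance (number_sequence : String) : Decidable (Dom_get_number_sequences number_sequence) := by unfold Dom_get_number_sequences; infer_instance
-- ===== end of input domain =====

-- B replaces A's flag-driven single loop by a prefix-scan + suffix-filter decomposition (simpler; same cost).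

-- ===== PORT A =====
-- the for-loop with accumulators first_sequence, second_sequence and flag is_first_sequence
def gnsLoopA : List Char → List Char → List Char → Bool → List Char × List Char
  | [], f, s, _ => (f, s)
  | c :: rest, f, s, b =>
    if PySem.Chars.isdigit c then
      if b then gnsLoopA rest (f ++ [c]) s b
      else gnsLoopA rest f (s ++ [c]) b
    else gnsLoopA rest f s false

def get_number_sequences (number_sequence : String) : String × String :=
  let p := gnsLoopA number_sequence.toList [] [] true
  (String.ofList p.1, String.ofList p.2)

-- ===== PORT B =====
-- the while-loop 'while i < n and number_sequence[i].isdigit(): i += 1'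
def gnsAltCount : List Char → Nat
  | [] => 0
  | c :: rest => if PySem.Chars.isdigit c then gnsAltCount rest + 1 else 0

def get_number_sequences_alt (number_sequence : String) : String × String :=
  let l := number_sequence.toList
  let i := gnsAltCount l
  (String.ofList (l.take i), String.ofList ((l.drop i).filter (fun c => PySem.Chars.isdigit c)))

-- ===== PRECONDITION & SPEC =====
def Spec_get_number_sequences (number_sequence : String) (out : String × String) : Prop := out = get_number_sequences_alt number_sequence
instance (number_sequence : String) (out : String × String) : Decidable (Spec_get_number_sequences number_sequence out) := by unfold Spec_get_number_sequences; infer_instance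

-- ===== CLAIM (what is proved, stated in full; the proofs are below) =====
def Claim_equal_get_number_sequences : Prop := ∀ (number_sequence : String), Dom_get_number_sequences number_sequence → Spec_get_number_sequences number_sequence (get_number_sequences number_sequence)

-- ===== LEMMAS AND PROOFS =====

theorem gnsLoopA_false (l : List Char) : ∀ f s,
    gnsLoopA l f s false = (f, s ++ l.filter (fun c => PySem.Chars.isdigit c)) := by
  induction l with
  | nil => simp [gnsLoopA]
  | cons c rest ih =>
    intro f s
    by_cases h : PySem.Chars.isdigit c
    · simp [gnsLoopA, h, ih]
    · simp [gnsLoopA, h, ih]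

theorem gnsLoopA_true (l : List Char) : ∀ f s,
    gnsLoopA l f s true =
      (f ++ l.takeWhile (fun c => PySem.Chars.isdigit c),
       s ++ (l.dropWhile (fun c => PySem.Chars.isdigit c)).filter (fun c => PySem.Chars.isdigit c)) := by
  induction l with
  | nil => simp [gnsLoopA]
  | cons c rest ih =>
    intro f s
    by_cases h : PySem.Chars.isdigit c
    · simp [gnsLoopA, h, ih]
    · simp [gnsLoopA, h, gnsLoopA_false]

theorem gnsAltCount_eq (l : List Char) :
    gnsAltCount l = (l.takeWhile (fun c => PySem.Chars.isdigit c)).length := by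
  induction l with
  | nil => rfl
  | cons c rest ih =>
    by_cases h : PySem.Chars.isdigit c
    · simp [gnsAltCount, h, ih]
    · simp [gnsAltCount, h]

-- ===== VERDICT (by name: the statement is the Claim_ definition above) =====
theorem take_len_takeWhile (l : List Char) (p : Char → Bool) :
    l.take (l.takeWhile p).length = l.takeWhile p := by
  have h : (l.takeWhile p ++ l.dropWhile p).take (l.takeWhile p).length = l.takeWhile p :=
    List.take_left
  rwa [List.takeWhile_append_dropWhile] at h

theorem drop_len_takeWhile (l : List Char) (p : Char → Bool) :
    l.drop (l.takeWhile p).length = l.dropWhile p := by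
  have h : (l.takeWhile p ++ l.dropWhile p).drop (l.takeWhile p).length = l.dropWhile p :=
    List.drop_left
  rwa [List.takeWhile_append_dropWhile] at h

theorem get_number_sequences_spec : Claim_equal_get_number_sequences := by
  intro ns _
  unfold Spec_get_number_sequences get_number_sequences get_number_sequences_alt
  simp [gnsLoopA_true, gnsAltCount_eq, take_len_takeWhile, drop_len_takeWhile]
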